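-- pv_equiv track=rewrite | github.com/shakayami/mathcompetition2020 | problem_2_2.py | solve
-- ===== SOURCE A (Python) =====
-- def solve(m):
--     X=[1 for i in range(10)]
--     A=[1]
--     for i in range(m):
--         B=[0 for i in range(len(A)+len(X)-1)]
--         for i,x in enumerate(X):
--             for j,y in enumerate(A):
--                 B[i+j]+=x*y
--         A=B
--     return A
-- ===== SOURCE B (Python) =====
-- def solve(m):
--     A = [1]
--     for _ in range(m):
--         n = len(A)
--         out = []
--         s = 0
--         for k in range(n + 9):
--             if k < n:
--                 s += A[k]
--             if k >= 10:
--                 s -= A[k - 10]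
--             out.append(s)
--         A = out
--     return A
-- ===== Notes on version B (the rewrite author's own statement) =====
-- stated objective: alternative
-- what changed: A's nested enumerate loops convolving with the all-ones list of length ten are replaced by a single sliding-window running sum per multiplication step: each coefficient is the previous running sum plus the entering element minus the element that leaves the window.
import Mathlib
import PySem

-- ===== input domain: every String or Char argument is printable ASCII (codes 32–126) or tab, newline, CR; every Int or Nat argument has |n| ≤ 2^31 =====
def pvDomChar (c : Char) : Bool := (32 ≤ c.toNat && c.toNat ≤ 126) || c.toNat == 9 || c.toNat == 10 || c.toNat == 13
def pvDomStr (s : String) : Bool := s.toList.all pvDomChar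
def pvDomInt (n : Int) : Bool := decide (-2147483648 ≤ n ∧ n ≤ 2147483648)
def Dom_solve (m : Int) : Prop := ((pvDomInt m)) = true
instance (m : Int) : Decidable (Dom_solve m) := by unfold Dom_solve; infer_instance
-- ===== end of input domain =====

-- B replaces A's nested convolution inner loops by a sliding-window running sum per step (alternative, fewer inner-loop operations).

-- ===== PORT A =====
-- inner 'for j,y in enumerate(A): B[i+j]+=x*y' loop of A
def convInner (i x : Int) (A B : List Int) : List Int :=
  (PySem.List.enumerate A 0).foldl
    (fun B jy => PySem.List.pySetD B (i + jy.1) (PySem.List.pyGetD B (i + jy.1) 0 + x * jy.2)) B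

-- one iteration of A's outer 'for i in range(m)' loop
def stepA (A : List Int) : List Int :=
  let X : List Int := (PySem.List.pyRange 0 10 1).map (fun _ => (1 : Int))
  let B0 : List Int :=
    (PySem.List.pyRange 0 ((A.length : Int) + (X.length : Int) - 1) 1).map (fun _ => (0 : Int))
  (PySem.List.enumerate X 0).foldl (fun B ix => convInner ix.1 ix.2 A B) B0

def solve (m : Int) : List Int :=
  (PySem.List.pyRange 0 m 1).foldl (fun A _ => stepA A) [1]

-- ===== PORT B =====
-- body of B's inner loop: update the running window sum s at position k
def stepBupd (A : List Int) (s : Int) (k : Int) : Int :=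
  let s1 := if k < (A.length : Int) then s + PySem.List.pyGetD A k 0 else s
  if 10 ≤ k then s1 - PySem.List.pyGetD A (k - 10) 0 else s1

-- one iteration of B's loop: sliding-window running sum
def stepB (A : List Int) : List Int :=
  ((PySem.List.pyRange 0 ((A.length : Int) + 9) 1).foldl
    (fun (p : List Int × Int) k =>
      let s2 := stepBupd A p.2 k
      (p.1 ++ [s2], s2)) (([] : List Int), (0 : Int))).1

def solve_alt (m : Int) : List Int :=
  (PySem.List.pyRange 0 m 1).foldl (fun A _ => stepB A) [1]

-- ===== PRECONDITION & SPEC =====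
def Spec_solve (m : Int) (out : List Int) : Prop := out = solve_alt m
instance (m : Int) (out : List Int) : Decidable (Spec_solve m out) := by unfold Spec_solve; infer_instance

-- ===== CLAIM (what is proved, stated in full; the proofs are below) =====
def Claim_equal_solve : Prop := ∀ (m : Int), Dom_solve m → Spec_solve m (solve m)

-- ===== LEMMAS AND PROOFS =====

-- window term: contribution of shift i to coefficient k
def winT (A : List Int) (i k : Nat) : Int :=
  if i ≤ k ∧ k < i + A.length then A.getD (k - i) 0 else 0

-- window sum: coefficient k of A * (1 + x + ... + x^9)
def winS (A : List Int) (k : Nat) : Int := ∑ i ∈ Finset.range 10, winT A i k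

-- innerFold generalizes convInner's fold over an arbitrary enumerate start
def innerFold (i x : Int) (A : List Int) (s : Int) (B : List Int) : List Int :=
  (PySem.List.enumerate A s).foldl
    (fun B jy => PySem.List.pySetD B (i + jy.1) (PySem.List.pyGetD B (i + jy.1) 0 + x * jy.2)) B

theorem convInner_eq_innerFold (i x : Int) (A B : List Int) :
    convInner i x A B = innerFold i x A 0 B := rfl

theorem innerFold_cons (i x a : Int) (A : List Int) (s : Int) (B : List Int) :
    innerFold i x (a :: A) s B
      = innerFold i x A (s + 1)
          (PySem.List.pySetD B (i + s) (PySem.List.pyGetD B (i + s) 0 + x * a)) := by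
  simp [innerFold, PySem.List.enumerate_cons]

theorem innerFold_length (i x : Int) (A : List Int) :
    ∀ (s : Int) (B : List Int), (innerFold i x A s B).length = B.length := by
  induction A with
  | nil => intro s B; simp [innerFold]
  | cons a A ih =>
      intro s B
      rw [innerFold_cons, ih]
      simp [PySem.List.length_pySetD]

theorem getD_set_eq_ite (l : List Int) (n k : Nat) (v d : Int) :
    (l.set n v).getD k d = if k = n ∧ n < l.length then v else l.getD k d := by
  rcases eq_or_ne k n with rfl | h
  · by_cases hn : k < l.length
    · simp [List.getD_eq_getElem?_getD, hn]
    · simp [List.getD_eq_getElem?_getD, hn]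
  · simp [List.getD_eq_getElem?_getD, List.getElem?_set_ne (Ne.symm h), h]

theorem innerFold_getD (x : Int) (A : List Int) :
    ∀ (i s : Int) (B : List Int) (k : Nat), 0 ≤ i → 0 ≤ s →
      i + s + A.length ≤ (B.length : Int) →
      (innerFold i x A s B).getD k 0
        = B.getD k 0 +
          (if i + s ≤ (k : Int) ∧ (k : Int) < i + s + A.length
           then x * A.getD (k - (i + s).toNat) 0 else 0) := by
  induction A with
  | nil =>
      intro i s B k hi hs h
      simp [innerFold, PySem.List.enumerate_nil]
  | cons a A ih =>
      intro i s B k hi hs h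
      simp only [List.length_cons] at h
      rw [innerFold_cons]
      have hnB : (i + s).toNat < B.length := by push_cast at h; omega
      have hset : PySem.List.pySetD B (i + s) (PySem.List.pyGetD B (i + s) 0 + x * a)
          = B.set (i + s).toNat (B.getD (i + s).toNat 0 + x * a) := by
        rw [PySem.List.pySetD_of_nonneg (h := by omega)]
        congr 2
        rw [PySem.List.pyGetD_eq_getElem (h0 := by omega) (h1 := by push_cast at h ⊢; omega)]
        rw [List.getD_eq_getElem _ _ hnB]
      rw [hset, ih i (s + 1) _ k hi (by omega)
            (by simp only [List.length_set]; push_cast at h ⊢; omega)]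
      rw [getD_set_eq_ite]
      rcases eq_or_ne k (i + s).toNat with hk | hk
      · have g1 : ¬(i + (s + 1) ≤ (k : Int) ∧ (k : Int) < i + (s + 1) + (A.length : Int)) := by
          omega
        have g2 : (i + s ≤ (k : Int) ∧ (k : Int) < i + s + ((a :: A).length : Int)) := by
          refine ⟨by omega, ?_⟩
          simp only [List.length_cons] at h ⊢
          push_cast at h ⊢
          omega
        have hidx : k - (i + s).toNat = 0 := by omega
        rw [if_pos ⟨hk, hnB⟩, if_neg g1, if_pos g2, hidx]
        simp only [List.getD_cons_zero]
        rw [hk]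
        ring
      · rw [if_neg (show ¬(k = (i + s).toNat ∧ (i + s).toNat < B.length) from
            fun hc => hk hc.1)]
        by_cases hg : i + s ≤ (k : Int) ∧ (k : Int) < i + s + ((a :: A).length : Int)
        · have hg' : i + (s + 1) ≤ (k : Int) ∧ (k : Int) < i + (s + 1) + (A.length : Int) := by
            simp only [List.length_cons] at hg
            push_cast at hg
            constructor <;> omega
          rw [if_pos hg', if_pos hg]
          have h1 : k - (i + s).toNat = (k - (i + (s + 1)).toNat) + 1 := by omega
          rw [h1, List.getD_cons_succ]
        · have hg' : ¬(i + (s + 1) ≤ (k : Int) ∧ (k : Int) < i + (s + 1) + (A.length : Int)) := by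
            simp only [List.length_cons] at hg
            push_cast at hg
            omega
          rw [if_neg hg', if_neg hg]

theorem conv_getD (A : List Int) (i : Int) (hi : 0 ≤ i) (x : Int) (B : List Int)
    (hB : i + A.length ≤ (B.length : Int)) (k : Nat) :
    (convInner i x A B).getD k 0 = B.getD k 0 + x * winT A i.toNat k := by
  rw [convInner_eq_innerFold,
      innerFold_getD x A i 0 B k hi le_rfl (by simpa using hB)]
  congr 1
  unfold winT
  rw [mul_ite, mul_zero]
  have hg : (i + 0 ≤ (k : Int) ∧ (k : Int) < i + 0 + (A.length : Int))
      ↔ (i.toNat ≤ k ∧ k < i.toNat + A.length) := by omega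
  rw [show (i + 0).toNat = i.toNat by omega, if_congr hg rfl rfl]

theorem convInner_length (i x : Int) (A B : List Int) :
    (convInner i x A B).length = B.length := by
  rw [convInner_eq_innerFold, innerFold_length]

theorem foldl_conv_length (A : List Int) (L : List (Int × Int)) :
    ∀ B : List Int, (L.foldl (fun B ix => convInner ix.1 ix.2 A B) B).length = B.length := by
  induction L with
  | nil => intro B; rfl
  | cons p L ih => intro B; rw [List.foldl_cons, ih, convInner_length]

theorem foldl_conv_getD (A : List Int) (k : Nat) :
    ∀ (L : List (Int × Int)) (B : List Int),
      (∀ p ∈ L, 0 ≤ p.1 ∧ p.1 + A.length ≤ (B.length : Int)) →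
      (L.foldl (fun B ix => convInner ix.1 ix.2 A B) B).getD k 0
        = B.getD k 0 + (L.map (fun p => p.2 * winT A p.1.toNat k)).sum := by
  intro L
  induction L with
  | nil => intro B _; simp
  | cons p L ih =>
      intro B hb
      rw [List.foldl_cons,
          ih _ (fun q hq => ⟨(hb q (List.mem_cons_of_mem p hq)).1,
            by rw [convInner_length]; exact (hb q (List.mem_cons_of_mem p hq)).2⟩),
          conv_getD A p.1 (hb p List.mem_cons_self).1 p.2 B (hb p List.mem_cons_self).2 k]
      simp [List.map_cons, List.sum_cons]
      ring

theorem getD_map_zero (l : List Int) (k : Nat) :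
    (l.map (fun _ => (0 : Int))).getD k 0 = 0 := by
  induction l generalizing k with
  | nil => simp
  | cons a l ih =>
      cases k with
      | zero => simp
      | succ k => simp

theorem stepA_length (A : List Int) : (stepA A).length = A.length + 9 := by
  simp only [stepA]
  rw [foldl_conv_length]
  simp [PySem.List.length_pyRange_one]
  omega

theorem B0_length (A : List Int) :
    (((PySem.List.pyRange 0 ((A.length : Int) + (10 : Nat) - 1) 1).map
        (fun _ => (0 : Int))).length : Int) = (A.length : Int) + 9 := by
  simp [PySem.List.length_pyRange_one]
  omega

theorem stepA_getD (A : List Int) (k : Nat) : (stepA A).getD k 0 = winS A k := by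
  have hX : PySem.List.enumerate ((PySem.List.pyRange 0 10 1).map (fun _ => (1 : Int))) 0
      = [(0, 1), (1, 1), (2, 1), (3, 1), (4, 1), (5, 1), (6, 1), (7, 1), (8, 1), (9, 1)] := by
    decide
  have hXlen : ((PySem.List.pyRange 0 10 1).map (fun _ => (1 : Int))).length = 10 := by decide
  simp only [stepA, hX, hXlen]
  rw [foldl_conv_getD A k _ _ ?bounds]
  case bounds =>
    have hB := B0_length A
    intro p hp
    fin_cases hp <;> exact ⟨by norm_num, by rw [hB]; push_cast; omega⟩
  rw [getD_map_zero]
  simp [winS, Finset.sum_range_succ]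
  ring

theorem winT_shift (A : List Int) (i t : Nat) (ht : 1 ≤ t) :
    winT A (i + 1) t = winT A i (t - 1) := by
  unfold winT
  have hg : (i + 1 ≤ t ∧ t < i + 1 + A.length) ↔ (i ≤ t - 1 ∧ t - 1 < i + A.length) := by omega
  have hx : t - (i + 1) = t - 1 - i := by omega
  rw [hx, if_congr hg rfl rfl]

theorem winS_rec (A : List Int) (t : Nat) (ht : t < A.length + 9) :
    winS A t = (if t = 0 then 0 else winS A (t - 1))
      + (if t < A.length then A.getD t 0 else 0)
      - (if 10 ≤ t then A.getD (t - 10) 0 else 0) := by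
  have h0 : winT A 0 t = (if t < A.length then A.getD t 0 else 0) := by
    unfold winT
    rw [if_congr (by omega : (0 ≤ t ∧ t < 0 + A.length) ↔ t < A.length) rfl rfl,
        Nat.sub_zero]
  rcases Nat.eq_zero_or_pos t with rfl | ht1
  · rw [if_pos rfl, winS, Finset.sum_range_succ',
        Finset.sum_eq_zero (fun i _ => by
          unfold winT
          rw [if_neg (by omega)]),
        zero_add, h0]
    norm_num
  · have h9 : winT A 9 (t - 1) = (if 10 ≤ t then A.getD (t - 10) 0 else 0) := by
      unfold winT
      by_cases hc : 10 ≤ t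
      · rw [if_pos (by omega), if_pos hc, show t - 1 - 9 = t - 10 from by omega]
      · rw [if_neg (by omega), if_neg hc]
    rw [if_neg (by omega), winS, Finset.sum_range_succ',
        Finset.sum_congr rfl (fun i _ => winT_shift A i t ht1), h0,
        show winS A (t - 1) = ∑ i ∈ Finset.range 9, winT A i (t - 1) + winT A 9 (t - 1) from by
          rw [winS, Finset.sum_range_succ],
        h9]
    ring

theorem stepBupd_eq (A : List Int) (s : Int) (t : Nat) :
    stepBupd A s (t : Int)
      = s + (if t < A.length then A.getD t 0 else 0)
          - (if 10 ≤ t then A.getD (t - 10) 0 else 0) := by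
  simp only [stepBupd, PySem.List.pyGetD_natCast, Nat.cast_lt]
  by_cases h10 : 10 ≤ t
  · rw [if_pos (show (10 : Int) ≤ (t : Int) by exact_mod_cast h10), if_pos h10,
        show ((t : Int) - 10) = ((t - 10 : Nat) : Int) by omega, PySem.List.pyGetD_natCast]
    split_ifs <;> ring
  · rw [if_neg (show ¬(10 : Int) ≤ (t : Int) by exact_mod_cast h10), if_neg h10, sub_zero]
    split_ifs <;> ring

theorem stepB_eq (A : List Int) : stepB A = (List.range (A.length + 9)).map (winS A) := by
  have key : ∀ t : Nat, t ≤ A.length + 9 →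
      (PySem.List.pyRange 0 (t : Int) 1).foldl
        (fun (p : List Int × Int) k =>
          let s2 := stepBupd A p.2 k
          (p.1 ++ [s2], s2)) (([] : List Int), (0 : Int))
        = ((List.range t).map (winS A), if t = 0 then 0 else winS A (t - 1)) := by
    intro t
    induction t with
    | zero => intro _; simp
    | succ t ih =>
        intro ht
        rw [show ((t + 1 : Nat) : Int) = (t : Int) + 1 by push_cast; ring,
            PySem.List.pyRange_one_succ_right (by positivity), List.foldl_append,
            ih (by omega), List.foldl_cons, List.foldl_nil]
        have hupd : stepBupd A (if t = 0 then 0 else winS A (t - 1)) (t : Int) = winS A t := by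
          rw [stepBupd_eq, ← winS_rec A t (by omega)]
        simp only [hupd, List.range_succ, List.map_append, List.map_cons, List.map_nil]
        simp
  have := key (A.length + 9) le_rfl
  simp only [stepB]
  rw [show ((A.length : Int) + 9) = (((A.length + 9 : Nat)) : Int) by push_cast; ring, this]

theorem step_eq (A : List Int) : stepA A = stepB A := by
  rw [stepB_eq]
  apply List.ext_getElem
  · simp [stepA_length]
  · intro k h1 h2
    have hk : k < A.length + 9 := by simpa [stepA_length] using h1
    have h := stepA_getD A k
    rw [List.getD_eq_getElem _ _ h1] at h
    simp [h]

theorem foldl_step_ext (l : List Int) :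
    ∀ init : List Int,
      l.foldl (fun A _ => stepA A) init = l.foldl (fun A _ => stepB A) init := by
  induction l with
  | nil => intro init; rfl
  | cons a l ih => intro init; rw [List.foldl_cons, List.foldl_cons, step_eq, ih]

-- ===== VERDICT (by name: the statement is the Claim_ definition above) =====
theorem solve_spec : Claim_equal_solve := by
  intro m _
  unfold Spec_solve solve solve_alt
  exact foldl_step_ext _ [1]
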